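-- pv_equiv track=rewrite | github.com/oscarjalfarom/foundations-short-python | ciclos-immutabilidad/OrdenarTuplas.py | ordTuple
-- ===== SOURCE A (Python) =====
-- def ordTuple(tuple1):
--     temp = ()
--     for index in range(len(tuple1)-1):
--         flag = 0
--         for ver in range(len(temp)):
--             if tuple1[index] == temp[ver]:
--                 flag = 1
--                 break
--         if flag != 1:
--             temp = temp + (tuple1[index], )
--     temp = sorted(temp)
--     return temp
-- ===== SOURCE B (Python) =====
-- def ordTuple(tuple1):
--     result = []
--     for x in sorted(tuple1[:-1]):
--         if not result or x != result[-1]: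
--             result.append(x)
--     return result
-- ===== Notes on version B (the rewrite author's own statement) =====
-- stated objective: simpler
-- what changed: B sorts the first n-1 elements first and removes duplicates in one adjacent-comparison pass, instead of A's quadratic dedup-by-inner-membership-scan followed by a sort.
import Mathlib
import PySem

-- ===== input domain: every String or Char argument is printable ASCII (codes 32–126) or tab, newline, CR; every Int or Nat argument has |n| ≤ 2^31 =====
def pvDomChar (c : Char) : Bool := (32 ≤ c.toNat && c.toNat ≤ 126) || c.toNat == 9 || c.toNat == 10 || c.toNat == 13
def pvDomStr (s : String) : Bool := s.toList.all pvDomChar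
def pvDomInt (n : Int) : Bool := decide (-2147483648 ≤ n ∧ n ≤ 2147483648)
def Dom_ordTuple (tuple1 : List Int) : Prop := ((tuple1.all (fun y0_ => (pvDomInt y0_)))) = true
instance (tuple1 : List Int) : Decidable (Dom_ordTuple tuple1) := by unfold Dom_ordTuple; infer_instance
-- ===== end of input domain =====

-- B sorts the first n-1 elements first and dedups in one adjacent-comparison pass,
-- replacing A's quadratic membership-scan dedup followed by a sort (simpler/faster).

-- ===== PORT A =====
-- inner 'for ver in range(len(temp))' flag loop of A, walking temp in order with early break
def pvFlagA (x : Int) : List Int → Int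
  | [] => 0
  | t :: ts => if x = t then 1 else pvFlagA x ts

def ordTuple (tuple1 : List Int) : List Int :=
  let temp := (PySem.List.pyRange 0 ((tuple1.length : Int) - 1) 1).foldl
    (fun temp index =>
      let flag := pvFlagA (PySem.List.pyGetD tuple1 index 0) temp
      if flag ≠ 1 then temp ++ [PySem.List.pyGetD tuple1 index 0] else temp) []
  PySem.List.sorted temp (fun x => x) false

-- ===== PORT B =====
def ordTuple_alt (tuple1 : List Int) : List Int :=
  (PySem.List.sorted (PySem.List.slice tuple1 none (some (-1))) (fun x => x) false).foldl
    (fun result x =>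
      match result.getLast? with
      | none => result ++ [x]
      | some l => if x ≠ l then result ++ [x] else result) []

-- ===== PRECONDITION & SPEC =====
def Spec_ordTuple (tuple1 : List Int) (out : List Int) : Prop := out = ordTuple_alt tuple1
instance (tuple1 : List Int) (out : List Int) : Decidable (Spec_ordTuple tuple1 out) := by unfold Spec_ordTuple; infer_instance

-- ===== CLAIM (what is proved, stated in full; the proofs are below) =====
def Claim_equal_ordTuple : Prop := ∀ (tuple1 : List Int), Dom_ordTuple tuple1 → Spec_ordTuple tuple1 (ordTuple tuple1)

-- ===== LEMMAS AND PROOFS =====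

-- proof-side helpers
def pvFA (temp : List Int) (x : Int) : List Int := if x ∈ temp then temp else temp ++ [x]

def pvFB (result : List Int) (x : Int) : List Int :=
  match result.getLast? with
  | none => result ++ [x]
  | some last => if x ≠ last then result ++ [x] else result

theorem pvFlagA_eq (x : Int) (t : List Int) : pvFlagA x t = if x ∈ t then 1 else 0 := by
  induction t with
  | nil => simp [pvFlagA]
  | cons a ts ih =>
    by_cases h : x = a
    · simp [pvFlagA, h]
    · simp [pvFlagA, h, ih]

theorem pvFA_eq (temp : List Int) (x : Int) :
    (if pvFlagA x temp ≠ 1 then temp ++ [x] else temp) = pvFA temp x := by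
  by_cases h : x ∈ temp <;> simp [pvFlagA_eq, pvFA, h]

-- A's outer loop: the accumulated temp is duplicate-free and collects exactly acc ∪ l
theorem foldA_props (l : List Int) (acc : List Int) (h : acc.Nodup) :
    (l.foldl pvFA acc).Nodup ∧ ∀ y, y ∈ l.foldl pvFA acc ↔ y ∈ acc ∨ y ∈ l := by
  induction l generalizing acc with
  | nil => simpa using h
  | cons a ls ih =>
    by_cases hm : a ∈ acc
    · rw [List.foldl_cons, show pvFA acc a = acc from by simp [pvFA, hm]]
      obtain ⟨h1, h2⟩ := ih acc h
      refine ⟨h1, fun y => ?_⟩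
      rw [h2 y]
      constructor
      · rintro (hy | hy)
        · exact Or.inl hy
        · exact Or.inr (List.mem_cons_of_mem a hy)
      · rintro (hy | hy)
        · exact Or.inl hy
        · rcases List.mem_cons.mp hy with h' | h'
          · exact Or.inl (h' ▸ hm)
          · exact Or.inr h' 
    · rw [List.foldl_cons, show pvFA acc a = acc ++ [a] from by simp [pvFA, hm]]
      have hacc : (acc ++ [a]).Nodup := by
        rw [List.nodup_append]
        exact ⟨h, List.nodup_singleton a, by
          intro b hb c hc
          rw [List.mem_singleton] at hc
          subst hc
          exact fun e => hm (e ▸ hb)⟩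
      obtain ⟨h1, h2⟩ := ih (acc ++ [a]) hacc
      refine ⟨h1, fun y => ?_⟩
      rw [h2 y]
      simp [or_assoc]

-- B's loop: on a ≤-sorted input, the result is <-sorted and collects exactly res ∪ l
theorem foldB_props (l : List Int) (res : List Int)
    (hl : l.Pairwise (· ≤ ·)) (h1 : res.Pairwise (· < ·))
    (h2 : ∀ a ∈ res, ∀ b ∈ l, a ≤ b) :
    (l.foldl pvFB res).Pairwise (· < ·) ∧ ∀ y, y ∈ l.foldl pvFB res ↔ y ∈ res ∨ y ∈ l := by
  induction l generalizing res with
  | nil => simpa using h1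
  | cons a ls ih =>
    have hls : ls.Pairwise (· ≤ ·) := hl.tail
    have hal : ∀ b ∈ ls, a ≤ b := fun b hb => (List.pairwise_cons.mp hl).1 b hb
    rw [List.foldl_cons]
    cases hres : res.getLast? with
    | none =>
      have hre : res = [] := List.getLast?_eq_none_iff.mp hres
      subst hre
      rw [show pvFB [] a = [a] from rfl]
      obtain ⟨g1, g2⟩ := ih [a] hls (List.pairwise_singleton _ _)
        (by intro x hx b hb; simp at hx; exact hx ▸ hal b hb)
      refine ⟨g1, fun y => ?_⟩
      rw [g2 y]; simp
    | some last =>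
      have hlast : last ∈ res := List.mem_of_getLast? hres
      by_cases hne : a ≠ last
      · have hlt : last < a := lt_of_le_of_ne (h2 last hlast a (by simp)) (Ne.symm hne)
        rw [show pvFB res a = res ++ [a] from by simp [pvFB, hres, hne]]
        have hle_last : ∀ x ∈ res, x ≤ last := by
          intro x hx
          rcases List.getLast?_eq_some_iff.mp hres with ⟨ys, hys⟩
          rw [hys] at hx h1
          rcases List.mem_append.mp hx with hx' | hx'
          · exact le_of_lt ((List.pairwise_append.mp h1).2.2 x hx' last (by simp))
          · simp at hx'; exact le_of_eq hx'
        have hp : (res ++ [a]).Pairwise (· < ·) := by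
          rw [List.pairwise_append]
          exact ⟨h1, by simp, fun x hx y hy => by
            simp at hy; exact hy ▸ lt_of_le_of_lt (hle_last x hx) hlt⟩
        obtain ⟨g1, g2⟩ := ih (res ++ [a]) hls hp
          (by intro x hx b hb
              rcases List.mem_append.mp hx with hx' | hx'
              · exact h2 x hx' b (by simp [hb])
              · simp at hx'; exact hx' ▸ hal b hb)
        refine ⟨g1, fun y => ?_⟩
        rw [g2 y]
        simp [or_assoc]
      · rw [not_not] at hne
        rw [show pvFB res a = res from by simp [pvFB, hres, hne]]
        obtain ⟨g1, g2⟩ := ih res hls h1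
          (fun x hx b hb => le_trans (h2 x hx a (by simp)) (hal b hb))
        refine ⟨g1, fun y => ?_⟩
        rw [g2 y]
        constructor
        · rintro (hy | hy)
          · exact Or.inl hy
          · exact Or.inr (List.mem_cons_of_mem a hy)
        · rintro (hy | hy)
          · exact Or.inl hy
          · rcases List.mem_cons.mp hy with h' | h'
            · exact Or.inl (h' ▸ hne ▸ hlast)
            · exact Or.inr h' 

theorem foldl_fun_congr {α β : Type} (l : List β) (f g : α → β → α) (init : α)
    (h : ∀ acc x, x ∈ l → f acc x = g acc x) : l.foldl f init = l.foldl g init := by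
  induction l generalizing init with
  | nil => rfl
  | cons a ls ih =>
    rw [List.foldl_cons, List.foldl_cons, h init a (by simp)]
    exact ih _ (fun acc x hx => h acc x (List.mem_cons_of_mem a hx))

theorem ordTuple_spec' (tuple1 : List Int) : ordTuple tuple1 = ordTuple_alt tuple1 := by
  have hslice : PySem.List.slice tuple1 none (some (-1)) = tuple1.dropLast :=
    PySem.List.slice_to_neg_one tuple1
  -- A's index loop equals the element fold pvFA over dropLast
  have hA : (PySem.List.pyRange 0 ((tuple1.length : Int) - 1) 1).foldl
      (fun temp index =>
        if pvFlagA (PySem.List.pyGetD tuple1 index 0) temp ≠ 1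
        then temp ++ [PySem.List.pyGetD tuple1 index 0] else temp) []
      = tuple1.dropLast.foldl pvFA [] := by
    rcases List.eq_nil_or_concat tuple1 with hnil | ⟨ys, y, hys⟩
    · subst hnil
      rw [PySem.List.pyRange_one_eq_nil (by norm_num)]
      rfl
    · have hlen : ((tuple1.length : Int) - 1) = ((tuple1.dropLast.length : Int)) := by
        subst hys; simp
      rw [hlen]
      have hcongr : (PySem.List.pyRange 0 ((tuple1.dropLast.length : Int)) 1).foldl
          (fun temp index =>
            if pvFlagA (PySem.List.pyGetD tuple1 index 0) temp ≠ 1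
            then temp ++ [PySem.List.pyGetD tuple1 index 0] else temp) []
          = (PySem.List.pyRange 0 ((tuple1.dropLast.length : Int)) 1).foldl
          (fun temp index => pvFA temp (PySem.List.pyGetD tuple1.dropLast index 0)) [] := by
        apply foldl_fun_congr
        intro acc x hx
        rw [PySem.List.mem_pyRange_one] at hx
        have hx2 : x < (tuple1.dropLast.length : Int) := hx.2
        obtain ⟨k, rfl⟩ : ∃ k : ℕ, x = (k : Int) := ⟨x.toNat, (Int.toNat_of_nonneg hx.1).symm⟩
        have hk : k < tuple1.dropLast.length := by exact_mod_cast hx2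
        have hget : PySem.List.pyGetD tuple1 (k : Int) 0 = PySem.List.pyGetD tuple1.dropLast (k : Int) 0 := by
          rw [PySem.List.pyGetD_natCast, PySem.List.pyGetD_natCast,
              List.getD_eq_getElem _ _ (hn := by simp at hk ⊢; omega),
              List.getD_eq_getElem _ _ (hn := hk)]
          exact (List.getElem_dropLast (by simpa using hk)).symm
        simp only [hget, pvFA_eq]
      rw [hcongr]
      have := PySem.List.foldl_pyRange_zero_pyGetD (xs := tuple1.dropLast) (f := pvFA)
        (d := 0) (init := ([] : List Int))
      simpa [PySem.List.len] using this
  -- assemble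
  simp only [ordTuple, ordTuple_alt]
  rw [hslice, hA]
  obtain ⟨hAnodup, hAmem⟩ := foldA_props tuple1.dropLast [] List.nodup_nil
  have hspair : (PySem.List.sorted tuple1.dropLast (fun x => x) false).Pairwise (· ≤ ·) :=
    PySem.List.sorted_pairwise _ _
  obtain ⟨hBpair, hBmem⟩ := foldB_props (PySem.List.sorted tuple1.dropLast (fun x => x) false)
    [] hspair List.Pairwise.nil (by simp)
  have hBfold : (PySem.List.sorted tuple1.dropLast (fun x => x) false).foldl
      (fun result x =>
        match result.getLast? with
        | none => result ++ [x]
        | some l => if x ≠ l then result ++ [x] else result) []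
      = (PySem.List.sorted tuple1.dropLast (fun x => x) false).foldl pvFB [] := rfl
  rw [hBfold]
  have hBnodup : ((PySem.List.sorted tuple1.dropLast (fun x => x) false).foldl pvFB []).Nodup :=
    hBpair.imp (fun h => ne_of_lt h)
  have hperm : ((PySem.List.sorted tuple1.dropLast (fun x => x) false).foldl pvFB []).Perm
      (tuple1.dropLast.foldl pvFA []) := by
    rw [List.perm_ext_iff_of_nodup hBnodup hAnodup]
    intro y
    rw [hBmem y, hAmem y]
    simp [PySem.List.mem_sorted]
  exact PySem.List.sorted_eq_of_perm_of_pairwise_lt _ _ _ hperm hBpair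

-- ===== VERDICT (by name: the statement is the Claim_ definition above) =====
theorem ordTuple_spec : Claim_equal_ordTuple := by
  intro tuple1 _
  exact ordTuple_spec' tuple1
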